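-- pv_equiv track=rewrite | github.com/obb199/machineLearning | kmeans_implementation/kmeans.py | index_smaller_element
-- ===== SOURCE A (Python) =====
-- def index_smaller_element(vec):
--     smaller_idx = 0
--     smaller_value = vec[0]
--
--     for i in range(len(vec)):
--         if vec[i] < smaller_value:
--             smaller_value = vec[i]
--             smaller_idx = i
--
--     return smaller_idx
-- ===== SOURCE B (Python) =====
-- def index_smaller_element(vec):
--     return vec.index(min(vec))
-- ===== Notes on version B (the rewrite author's own statement) =====
-- stated objective: idiomatic
-- what changed: Replaces the fused index loop tracking (smaller_idx, smaller_value) with the idiomatic two-pass vec.index(min(vec)): compute the minimum, then locate its first occurrence.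
import Mathlib
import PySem

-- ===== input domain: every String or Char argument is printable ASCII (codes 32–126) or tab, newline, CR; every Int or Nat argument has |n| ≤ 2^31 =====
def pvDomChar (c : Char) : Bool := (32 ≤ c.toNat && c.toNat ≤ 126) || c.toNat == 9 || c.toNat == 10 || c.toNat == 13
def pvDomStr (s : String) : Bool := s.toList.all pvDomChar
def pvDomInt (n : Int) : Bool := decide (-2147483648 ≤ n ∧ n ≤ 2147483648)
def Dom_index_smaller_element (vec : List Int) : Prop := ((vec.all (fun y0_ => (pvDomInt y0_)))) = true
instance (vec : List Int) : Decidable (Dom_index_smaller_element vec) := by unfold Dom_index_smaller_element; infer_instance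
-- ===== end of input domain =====

-- B replaces A's fused index loop with the idiomatic two-pass min-then-index; equivalent on non-empty lists.


-- ===== PORT A =====
-- A: smaller_idx/smaller_value accumulator over 'for i in range(len(vec))'; vec[0] raises IndexError on [] (excluded by Pre_).
def index_smaller_element (vec : List Int) : Int :=
  match vec with
  | [] => 0  -- Python raises IndexError here; outside Pre_
  | v0 :: _ =>
    ((PySem.List.pyRange 0 (vec.length : Int) 1).foldl
      (fun (s : Int × Int) i =>
        let x := PySem.List.pyGetD vec i 0   -- vec[i], i always in range
        if x < s.2 then (i, x) else s) (0, v0)).1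

-- ===== PORT B =====
-- B: vec.index(min(vec)); both min() and .index raise on [] / missing value — none is unreachable under Pre_.
def index_smaller_element_alt (vec : List Int) : Int :=
  match PySem.List.min? vec (fun x => x) with
  | none => 0  -- min([]) raises ValueError; outside Pre_
  | some m =>
    match PySem.List.index? vec m with
    | none => 0  -- unreachable: the minimum is a member
    | some k => (k : Int)

-- ===== PRECONDITION & SPEC =====
-- Pre_ excludes only the empty list, on which A raises IndexError (vec[0]).
def Pre_index_smaller_element (vec : List Int) : Prop := vec ≠ []
instance (vec : List Int) : Decidable (Pre_index_smaller_element vec) := by unfold Pre_index_smaller_element; infer_instance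
def pvWitness_index_smaller_element : List Int := [3, 1, 2, 1]

def Spec_index_smaller_element (vec : List Int) (out : Int) : Prop := out = index_smaller_element_alt vec
instance (vec : List Int) (out : Int) : Decidable (Spec_index_smaller_element vec out) := by unfold Spec_index_smaller_element; infer_instance

-- ===== CLAIM (what is proved, stated in full; the proofs are below) =====
def Claim_equal_index_smaller_element : Prop := ∀ (vec : List Int), Dom_index_smaller_element vec → Pre_index_smaller_element vec → Spec_index_smaller_element vec (index_smaller_element vec)

-- ===== LEMMAS AND PROOFS =====

theorem foldl_min_le (t : List Int) (v : Int) : List.foldl min v t ≤ v := by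
  induction t generalizing v with
  | nil => simp
  | cons x t ih => exact le_trans (ih (min v x)) (min_le_left _ _)

theorem foldl_min_mem (t : List Int) (v : Int) (h : List.foldl min v t ≠ v) :
    List.foldl min v t ∈ t := by
  induction t generalizing v with
  | nil => simp at h
  | cons x t ih =>
    by_cases hx : List.foldl min (min v x) t = min v x
    · simp only [List.foldl_cons] at h ⊢
      rw [hx] at h ⊢
      rcases min_cases v x with ⟨he, _⟩ | ⟨he, _⟩
      · exact absurd he h
      · simp [he]
    · exact List.mem_cons_of_mem _ (ih (min v x) hx)

theorem idxOf?_eq_some_idxOf (m : Int) (t : List Int) (h : m ∈ t) :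
    List.idxOf? m t = some (List.idxOf m t) := by
  induction t with
  | nil => simp at h
  | cons x t ih =>
    by_cases hx : x = m
    · simp [List.idxOf?_cons, hx]
    · rw [List.idxOf?_cons, List.idxOf_cons_ne t hx]
      have hm : m ∈ t := by
        rcases List.mem_cons.mp h with h1 | h1
        · exact absurd h1.symm hx
        · exact h1
      simp [hx, ih hm]

-- A's loop over the tail, characterised: min value and first index where it improves on v.
theorem loop_spec (t : List Int) (s i v : Int) :
    (PySem.List.enumerate t s).foldl
      (fun (p : Int × Int) (q : Int × Int) => if q.2 < p.2 then q else p) (i, v)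
    = if List.foldl min v t < v
        then (s + (List.idxOf (List.foldl min v t) t : Nat), List.foldl min v t)
        else (i, v) := by
  induction t generalizing s i v with
  | nil => simp
  | cons x t ih =>
    rw [PySem.List.enumerate_cons, List.foldl_cons]
    by_cases hx : x < v
    · simp only [hx, if_pos]
      rw [ih]
      have hmin : min v x = x := min_eq_right hx.le
      have hle : List.foldl min x t ≤ x := foldl_min_le t x
      by_cases h2 : List.foldl min x t < x
      · have hne : x ≠ List.foldl min x t := (ne_of_lt h2).symm
        have hlt : List.foldl min x t < v := lt_trans h2 hx
        rw [if_pos h2, List.foldl_cons, hmin, if_pos hlt, List.idxOf_cons_ne t hne]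
        simp only [Prod.mk.injEq, and_true]
        push_cast; ring
      · have heq : List.foldl min x t = x := le_antisymm hle (not_lt.mp h2)
        simp [List.foldl_cons, hmin, heq, hx]
    · simp only [hx, if_neg, not_false_iff]
      rw [ih]
      have hmin : min v x = v := min_eq_left (not_lt.mp hx)
      by_cases h2 : List.foldl min v t < v
      · have hne : x ≠ List.foldl min v t := by
          intro he; exact hx (he ▸ h2)
        simp only [List.foldl_cons, hmin, h2, if_pos, List.idxOf_cons,
          beq_eq_false_iff_ne.mpr hne, cond_false, Prod.mk.injEq, and_true]
        push_cast; ring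
      · simp [List.foldl_cons, hmin, h2]

-- ===== VERDICT =====

theorem index_smaller_element_spec : Claim_equal_index_smaller_element := by
  intro vec _ hpre
  unfold Spec_index_smaller_element
  match vec, hpre with
  | v0 :: t, _ =>
    set m := List.foldl min v0 t with hm
    -- B side
    have hmin? : PySem.List.min? (v0 :: t) (fun x => x) = some m :=
      PySem.List.min?_id_cons v0 t
    -- A side: rewrite the pyRange fold as a fold over enumerate
    have hA : index_smaller_element (v0 :: t)
        = ((PySem.List.enumerate (v0 :: t) 0).foldl
            (fun (p : Int × Int) (q : Int × Int) => if q.2 < p.2 then q else p) (0, v0)).1 := by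
      unfold index_smaller_element
      rw [PySem.List.enumerate_eq_map_pyRange (v0 :: t) 0, List.foldl_map]
      simp
    rw [hA, PySem.List.enumerate_cons, List.foldl_cons]
    simp only [lt_irrefl, if_neg, not_false_iff]
    rw [loop_spec t (0+1) 0 v0, ← hm]
    unfold index_smaller_element_alt
    rw [hmin?]
    by_cases h : m < v0
    · have hne : v0 ≠ m := fun he => absurd (he ▸ h) (lt_irrefl _)
      have hmem : m ∈ t := foldl_min_mem t v0 (ne_of_lt h)
      rw [if_pos h]
      simp only [PySem.List.index?_eq_idxOf?, List.idxOf?_cons]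
      rw [if_neg (by simp [hne] : ¬ (v0 == m) = true), idxOf?_eq_some_idxOf m t hmem]
      simp only [Option.map_some]
      push_cast
      ring
    · have heq : m = v0 := le_antisymm (foldl_min_le t v0) (not_lt.mp h)
      rw [if_neg h]
      simp [heq, PySem.List.index?_eq_idxOf?, List.idxOf?_cons]
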